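-- pv_equiv track=rewrite | github.com/zhengcurry/demand_agent | coding/mcp_servers/feishu_server/server.py | _extract_doc_id
-- ===== SOURCE A (Python) =====
-- def _extract_doc_id(url: str) -> str:
--     """Extract document ID from Feishu URL"""
--     if "feishu.cn" in url or "larksuite.com" in url:
--         parts = url.split("/")
--         for i, part in enumerate(parts):
--             if part in ["docs", "docx", "wiki"]:
--                 if i + 1 < len(parts):
--                     return parts[i + 1].split("?")[0]
--     return url
-- ===== SOURCE B (Python) =====
-- def _extract_doc_id(url: str) -> str:
--     """Extract document ID from Feishu URL"""
--     if "feishu.cn" not in url and "larksuite.com" not in url: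
--         return url
--     rest = url
--     while "/" in rest:
--         seg, _, rest = rest.partition("/")
--         if seg in ("docs", "docx", "wiki"):
--             return rest.partition("/")[0].partition("?")[0]
--     return url
-- ===== Notes on version B (the rewrite author's own statement) =====
-- stated objective: alternative
-- what changed: B streams through the URL with str.partition on the slash separator (structural recursion on the remaining string) instead of materialising the full split list and scanning it with enumerate plus indexed lookups.
import Mathlib
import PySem

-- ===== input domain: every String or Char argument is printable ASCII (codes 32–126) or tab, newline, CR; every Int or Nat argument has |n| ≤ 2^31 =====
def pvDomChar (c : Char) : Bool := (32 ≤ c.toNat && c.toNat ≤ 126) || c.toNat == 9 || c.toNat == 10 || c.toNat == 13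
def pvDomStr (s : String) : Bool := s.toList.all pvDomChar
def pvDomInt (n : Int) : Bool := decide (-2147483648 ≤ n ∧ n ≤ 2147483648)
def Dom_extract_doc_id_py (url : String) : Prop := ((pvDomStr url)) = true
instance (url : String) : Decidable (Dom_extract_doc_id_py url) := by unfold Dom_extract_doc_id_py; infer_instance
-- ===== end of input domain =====

-- B replaces A's split-into-a-list-plus-enumerate scan by a str.partition loop that
-- consumes the string segment by segment (alternative decomposition, same cost).

-- ===== PORT A =====
-- the for-loop over enumerate(parts) with its early returns, as a recursion returning Option
def aScan (parts : List (List Char)) : List (Int × List Char) → Option (List Char)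
  | [] => none
  | (i, part) :: rest =>
    if ["docs".toList, "docx".toList, "wiki".toList].contains part then
      if i + 1 < (parts.length : Int) then
        match PySem.List.pyGet? parts (i + 1) with
        | some nxt => some ((PySem.Chars.splitOn nxt ['?']).headD [])  -- split never returns []: [0] is its head
        | none => none
      else aScan parts rest
    else aScan parts rest

def extract_doc_id_py (url : String) : String :=
  if PySem.Str.isIn "feishu.cn" url || PySem.Str.isIn "larksuite.com" url then
    let parts := PySem.Chars.splitOn url.toList ['/']
    match aScan parts (PySem.List.enumerate parts) with
    | some r => String.ofList r
    | none => url
  else url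

-- ===== PORT B =====
-- termination measure of the while loop: each partition step strictly shrinks the rest
theorem bGo_dec (c : Char) (rest : List Char) (h : PySem.Chars.isIn [c] rest = true) :
    ((rest.dropWhile (· != c)).tail).length < rest.length := by
  have hc : c ∈ rest := (List.singleton_infix_iff c rest).mp ((PySem.Chars.isIn_iff_infix _ _).mp h)
  have hne : rest.dropWhile (· != c) ≠ [] := by
    intro hnil
    have := (List.dropWhile_eq_nil_iff).mp hnil c hc
    simp at this
  have hle : (rest.dropWhile (· != c)).length ≤ rest.length := List.length_dropWhile_le _ _
  cases hd : rest.dropWhile (· != c) with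
  | nil => exact absurd hd hne
  | cons a t =>
      rw [hd] at hle
      simp at hle ⊢
      omega

-- the while loop over rest.partition(slash); partition with a one-char separator is
-- exact as takeWhile (before) / tail of dropWhile (after)
def bGo (rest : List Char) : Option (List Char) :=
  if h : PySem.Chars.isIn ['/'] rest = true then
    let seg := rest.takeWhile (· != '/')
    let rest2 := (rest.dropWhile (· != '/')).tail
    if seg == "docs".toList || seg == "docx".toList || seg == "wiki".toList then
      some ((rest2.takeWhile (· != '/')).takeWhile (· != '?'))
    else bGo rest2
  else none
termination_by rest.length
decreasing_by exact bGo_dec '/' rest h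

def extract_doc_id_py_alt (url : String) : String :=
  if !PySem.Str.isIn "feishu.cn" url && !PySem.Str.isIn "larksuite.com" url then url
  else
    match bGo url.toList with
    | some r => String.ofList r
    | none => url

-- ===== PRECONDITION & SPEC =====
def Spec_extract_doc_id_py (url : String) (out : String) : Prop := out = extract_doc_id_py_alt url
instance (url : String) (out : String) : Decidable (Spec_extract_doc_id_py url out) := by unfold Spec_extract_doc_id_py; infer_instance

-- ===== CLAIM (what is proved, stated in full; the proofs are below) =====
def Claim_equal_extract_doc_id_py : Prop := ∀ (url : String), Dom_extract_doc_id_py url → Spec_extract_doc_id_py url (extract_doc_id_py url)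

-- ===== LEMMAS AND PROOFS =====

-- single-character split, stated structurally (the common spec both ports are reduced to)
def splitC (c : Char) (l : List Char) : List (List Char) :=
  if h : PySem.Chars.isIn [c] l = true then
    l.takeWhile (· != c) :: splitC c ((l.dropWhile (· != c)).tail)
  else [l]
termination_by l.length
decreasing_by exact bGo_dec c l h

-- "first keyword segment that has a successor" — the common spec of both loops
def firstKw : List (List Char) → Option (List Char)
  | [] => none
  | p :: t =>
    if (p == "docs".toList || p == "docx".toList || p == "wiki".toList) && !t.isEmpty then
      some ((t.headD []).takeWhile (· != '?'))
    else firstKw t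

theorem isIn_single_iff (c : Char) (l : List Char) :
    PySem.Chars.isIn [c] l = true ↔ c ∈ l := by
  rw [PySem.Chars.isIn_iff_infix, List.singleton_infix_iff]

theorem splitC_ne_nil (c : Char) (l : List Char) : splitC c l ≠ [] := by
  unfold splitC; split <;> simp

theorem splitC_head (c : Char) (l : List Char) :
    (splitC c l).headD [] = l.takeWhile (· != c) := by
  unfold splitC
  split
  · rfl
  · next h =>
      have hc : c ∉ l := fun hc => h ((isIn_single_iff c l).mpr hc)
      simp only [List.headD]
      symm
      refine List.takeWhile_eq_self_iff.mpr fun a ha => ?_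
      simp only [bne_iff_ne, ne_eq]
      rintro rfl
      exact hc ha

theorem isIn_single_eq_false (c : Char) (l : List Char) (h : c ∉ l) :
    PySem.Chars.isIn [c] l = false := by
  cases hx : PySem.Chars.isIn [c] l
  · rfl
  · exact absurd ((isIn_single_iff c l).mp hx) h

theorem splitC_cons_ne (c ch : Char) (rest : List Char) (h : ch ≠ c) :
    splitC c (ch :: rest) = (splitC c rest).modifyHead (ch :: ·) := by
  have hb : (ch != c) = true := by simp [h]
  have hm : PySem.Chars.isIn [c] (ch :: rest) = PySem.Chars.isIn [c] rest := by
    by_cases hr : c ∈ rest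
    · rw [(isIn_single_iff c rest).mpr hr, (isIn_single_iff c (ch :: rest)).mpr (List.mem_cons_of_mem _ hr)]
    · rw [isIn_single_eq_false c rest hr, isIn_single_eq_false c (ch :: rest) (by
        intro hx
        rcases List.mem_cons.mp hx with h3 | h3
        · exact h h3.symm
        · exact hr h3)]
  conv_lhs => rw [splitC]
  conv_rhs => rw [splitC]
  rw [hm]
  by_cases hr : PySem.Chars.isIn [c] rest = true
  · simp [hr, List.takeWhile_cons, List.dropWhile_cons, hb]
  · simp [hr]

theorem go_spec (c : Char) :
    ∀ fuel (l cur : List Char) (accs : List (List Char)), l.length < fuel →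
      PySem.Chars.splitOn.go [c] fuel l cur accs =
        accs.reverse ++ (splitC c l).modifyHead (cur.reverse ++ ·) := by
  intro fuel
  induction fuel with
  | zero => intro l cur accs h; omega
  | succ fuel ih =>
    intro l cur accs h
    cases l with
    | nil =>
        rw [PySem.Chars.splitOn.go, splitC]
        · simp [isIn_single_eq_false c [] (by simp)]
        · omega
    | cons ch rest =>
        rw [PySem.Chars.splitOn.go]
        by_cases hch : c = ch
        · subst hch
          simp only [List.isPrefixOf, BEq.rfl, Bool.true_and, if_pos]
          have hd : List.drop [c].length (c :: rest) = rest := rfl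
          rw [hd, ih rest [] (cur.reverse :: accs) (by simpa using Nat.lt_of_succ_lt_succ h)]
          conv_rhs => rw [splitC]
          have hin : PySem.Chars.isIn [c] (c :: rest) = true :=
            (isIn_single_iff _ _).mpr (List.mem_cons_self)
          simp [hin, List.takeWhile_cons, List.dropWhile_cons]
          cases hX : splitC c rest with
          | nil => exact absurd hX (splitC_ne_nil _ _)
          | cons hd tl => simp
        · have hb : ([c].isPrefixOf (ch :: rest)) = false := by
            simp [List.isPrefixOf]
            exact hch
          rw [hb]
          simp only [Bool.false_eq_true, if_false]
          rw [ih rest (ch :: cur) accs (by simpa using Nat.lt_of_succ_lt_succ h)]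
          rw [splitC_cons_ne c ch rest (fun he => hch he.symm)]
          cases hX : splitC c rest with
          | nil => exact absurd hX (splitC_ne_nil _ _)
          | cons hd tl => simp

theorem splitOn_eq_splitC (c : Char) (l : List Char) :
    PySem.Chars.splitOn l [c] = splitC c l := by
  unfold PySem.Chars.splitOn
  rw [go_spec c (l.length + 1) l [] [] (by omega)]
  cases hX : splitC c l with
  | nil => exact absurd hX (splitC_ne_nil _ _)
  | cons hd tl => simp

theorem kw_eq (p : List Char) :
    (["docs".toList, "docx".toList, "wiki".toList].contains p) =
      (p == "docs".toList || p == "docx".toList || p == "wiki".toList) := by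
  have hb : ∀ q : List Char, (p == q) = decide (p = q) := by
    intro q
    by_cases h : p = q
    · subst h; simp
    · simp [h]
  simp [List.contains_cons, Bool.or_assoc, hb]

theorem aScan_spec (parts : List (List Char)) :
    ∀ (t : List (List Char)) (k : Nat), parts.drop k = t →
      aScan parts (PySem.List.enumerate t (k : Int)) = firstKw t := by
  intro t
  induction t with
  | nil => intro k hk; simp [PySem.List.enumerate, aScan, firstKw]
  | cons p t' ih =>
    intro k hk
    have hklen : k < parts.length := by
      by_contra hge
      rw [List.drop_eq_nil_of_le (by omega)] at hk
      exact absurd hk (by simp)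
    have hlen : parts.length = k + 1 + t'.length := by
      have := congrArg List.length hk
      simp [List.length_drop] at this
      omega
    have hdrop1 : parts.drop (k + 1) = t' := by
      have : parts.drop (k + 1) = (parts.drop k).drop 1 := by
        rw [List.drop_drop]
      rw [this, hk]
      rfl
    rw [PySem.List.enumerate, aScan, kw_eq, firstKw]
    by_cases hkw : (p == "docs".toList || p == "docx".toList || p == "wiki".toList) = true
    · rw [hkw]
      cases t' with
      | nil =>
          have hc : ¬ ((k : Int) + 1 < (parts.length : Int)) := by
            simp only [List.length_nil] at hlen
            push_cast
            omega
          simp only [if_neg hc, if_pos rfl]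
          have : ((k : Int) + 1) = ((k + 1 : Nat) : Int) := by push_cast; ring
          rw [this, ih (k + 1) hdrop1]
          simp [firstKw]
      | cons q t'' =>
          have hc : ((k : Int) + 1 < (parts.length : Int)) := by
            simp only [List.length_cons] at hlen
            push_cast
            omega
          simp only [if_pos hc, if_pos rfl]
          have hget : PySem.List.pyGet? parts ((k : Int) + 1) = some q := by
            have h1 : ((k : Int) + 1) = ((k + 1 : Nat) : Int) := by push_cast; ring
            rw [h1, PySem.List.pyGet?_natCast]
            rw [← List.head?_drop, hdrop1]
            rfl
          rw [hget]
          simp only [Option.some.injEq]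
          rw [splitOn_eq_splitC, splitC_head]
          rfl
    · rw [if_neg (by simpa using hkw)]
      have hne : ((p == "docs".toList || p == "docx".toList || p == "wiki".toList) && !t'.isEmpty) = false := by
        simp only [Bool.and_eq_false_iff]
        left
        simpa using hkw
      rw [hne]
      simp only [Bool.false_eq_true, if_false]
      have : ((k : Int) + 1) = ((k + 1 : Nat) : Int) := by push_cast; ring
      rw [this, ih (k + 1) hdrop1]

theorem bGo_spec (cs : List Char) : bGo cs = firstKw (splitC '/' cs) := by
  induction cs using bGo.induct with
  | case1 rest h seg hkw =>
      rw [bGo]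
      conv_rhs => rw [splitC]
      simp only [dif_pos h]
      rw [firstKw]
      have hE : (splitC '/' ((rest.dropWhile (· != '/')).tail)).isEmpty = false := by
        cases hX : splitC '/' ((rest.dropWhile (· != '/')).tail) with
        | nil => exact absurd hX (splitC_ne_nil _ _)
        | cons hd tl => rfl
      rw [show seg = List.takeWhile (fun x => x != '/') rest from rfl] at hkw
      simp only [hkw, hE, Bool.not_false, Bool.and_true, Bool.true_and, eq_self_iff_true,
        if_true, splitC_head]
  | case2 rest h seg rest2 hkw ih =>
      rw [bGo]
      conv_rhs => rw [splitC]
      simp only [dif_pos h]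
      rw [firstKw]
      rw [show seg = List.takeWhile (fun x => x != '/') rest from rfl] at hkw
      simp only [Bool.not_eq_true] at hkw
      simp only [hkw, Bool.false_and, Bool.false_eq_true, if_false]
      exact ih
  | case3 rest h =>
      rw [bGo]
      conv_rhs => rw [splitC]
      simp only [dif_neg h, firstKw]
      simp [firstKw]

-- ===== VERDICT (by name: the statement is the Claim_ definition above) =====
theorem extract_doc_id_py_spec : Claim_equal_extract_doc_id_py := by
  intro url _
  unfold Spec_extract_doc_id_py extract_doc_id_py extract_doc_id_py_alt
  have hmain : aScan (PySem.Chars.splitOn url.toList ['/'])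
      (PySem.List.enumerate (PySem.Chars.splitOn url.toList ['/'])) = bGo url.toList := by
    have h0 : PySem.List.enumerate (PySem.Chars.splitOn url.toList ['/']) =
        PySem.List.enumerate (PySem.Chars.splitOn url.toList ['/']) ((0 : Nat) : Int) := by
      norm_num
    rw [h0, aScan_spec _ _ 0 (by simp), bGo_spec, splitOn_eq_splitC]
  cases h1 : PySem.Str.isIn "feishu.cn" url <;> cases h2 : PySem.Str.isIn "larksuite.com" url <;>
    simp only [Bool.true_or, Bool.or_true, Bool.or_false, Bool.false_or, Bool.not_true,
      Bool.not_false, Bool.true_and, Bool.and_true, Bool.false_and, Bool.and_false,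
      Bool.false_eq_true, eq_self_iff_true, if_true, if_false, hmain]
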